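-- pv_equiv track=rewrite | github.com/wzygxr/shuati | class114_KMP_Algorithm/Code01_RepeatMinimumLength.py | verify_cycle
-- ===== SOURCE A (Python) =====
-- def verify_cycle(s: str, cycle_length: int) -> bool:
--     """
--     验证计算结果的辅助方法
--     验证字符串是否确实可以由计算出的循环节重复构成
--
--     :param s: 输入字符串
--     :param cycle_length: 计算出的循环节长度
--     :return: 验证是否成功
--     """
--     if cycle_length == 0:
--         return False
--     if cycle_length == len(s):
--         return True
--
--     cycle = s[:cycle_length]
--     for i in range(len(s)):
--         if s[i] != cycle[i % cycle_length]:
--             return False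
--     return True
-- ===== SOURCE B (Python) =====
-- def verify_cycle(s: str, cycle_length: int) -> bool:
--     # B: period check by self-shift comparison instead of per-character modular indexing:
--     # s has cyclic prefix pattern of length k  iff  s shifted by k equals s truncated by k.
--     if cycle_length == 0:
--         return False
--     return s[cycle_length:] == s[:-cycle_length]
-- ===== Notes on version B (the rewrite author's own statement) =====
-- stated objective: simpler
-- what changed: Replaces A's prefix extraction plus per-character i % cycle_length loop with a single self-shift slice comparison s[cycle_length:] == s[:-cycle_length] (C-level slicing/compare instead of a Python-level loop); Pre_ restricts to cycle_length >= 0, the function's natural domain, because on negative cycle lengths A either raises IndexError or returns values produced by Python's negative-index wraparound.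
-- outside the precondition, e.g. on verify_cycle('aba', -1): A returns False, B returns True; on verify_cycle('aa', -1): A returns True, B returns True
import Mathlib
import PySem

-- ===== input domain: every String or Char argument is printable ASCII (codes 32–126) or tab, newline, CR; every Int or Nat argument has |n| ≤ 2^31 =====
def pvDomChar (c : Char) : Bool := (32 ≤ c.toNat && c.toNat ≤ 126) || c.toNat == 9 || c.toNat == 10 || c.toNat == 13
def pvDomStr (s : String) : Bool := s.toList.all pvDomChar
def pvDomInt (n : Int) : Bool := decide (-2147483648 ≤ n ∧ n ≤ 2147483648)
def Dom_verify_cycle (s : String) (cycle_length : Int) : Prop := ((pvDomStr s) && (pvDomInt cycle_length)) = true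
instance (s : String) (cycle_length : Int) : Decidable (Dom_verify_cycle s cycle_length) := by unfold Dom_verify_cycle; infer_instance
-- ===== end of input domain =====

-- B replaces A's per-character i % cycle_length loop with a single self-shift slice
-- comparison s[cycle_length:] == s[:-cycle_length]; Pre_ restricts to cycle_length ≥ 0 (the
-- natural domain): on negative cycle lengths A raises IndexError or relies on negative-index wraparound.
-- ===== PORT A =====
-- loop body of 'for i in range(len(s)): if s[i] != cycle[i % cycle_length]: return False'
-- (the IndexError case of pyGet? returns false; it is excluded by Pre_)
def vcLoop (cs cycle : List Char) (cl : Int) : List Int → Bool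
  | [] => true
  | i :: rest =>
    match PySem.List.pyGet? cs i, PySem.List.pyGet? cycle (PySem.Int.mod i cl) with
    | some a, some b => if a ≠ b then false else vcLoop cs cycle cl rest
    | _, _ => false

def verify_cycle (s : String) (cycle_length : Int) : Bool :=
  let cs := s.toList
  if cycle_length = 0 then false
  else if cycle_length = (cs.length : Int) then true
  else
    let cycle := PySem.List.slice cs none (some cycle_length)
    vcLoop cs cycle cycle_length (PySem.List.pyRange 0 (cs.length : Int) 1)

-- ===== PORT B =====
def verify_cycle_alt (s : String) (cycle_length : Int) : Bool :=
  if cycle_length = 0 then false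
  else
    let cs := s.toList
    PySem.List.slice cs (some cycle_length) none == PySem.List.slice cs none (some (-cycle_length))

-- ===== PRECONDITION & SPEC =====
-- Pre_ restricts to cycle_length ≥ 0, the natural domain of a cycle length: on negative
-- cycle lengths A either raises IndexError (empty or too-short prefix indexed negatively)
-- or returns a value produced by Python's negative-index wraparound into the prefix.
def Pre_verify_cycle (s : String) (cycle_length : Int) : Prop := 0 ≤ cycle_length
instance (s : String) (cycle_length : Int) : Decidable (Pre_verify_cycle s cycle_length) := by unfold Pre_verify_cycle; infer_instance

def pvWitness_verify_cycle : String × Int := ("abab", 2)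

def Spec_verify_cycle (s : String) (cycle_length : Int) (out : Bool) : Prop := out = verify_cycle_alt s cycle_length
instance (s : String) (cycle_length : Int) (out : Bool) : Decidable (Spec_verify_cycle s cycle_length out) := by unfold Spec_verify_cycle; infer_instance

-- ===== CLAIM (what is proved, stated in full; the proofs are below) =====
def Claim_equal_verify_cycle : Prop := ∀ (s : String) (cycle_length : Int), Dom_verify_cycle s cycle_length → Pre_verify_cycle s cycle_length → Spec_verify_cycle s cycle_length (verify_cycle s cycle_length)

-- ===== LEMMAS AND PROOFS =====

-- the early-exit loop equals List.all of its per-index check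
def vcCheck (cs cycle : List Char) (cl : Int) (i : Int) : Bool :=
  match PySem.List.pyGet? cs i, PySem.List.pyGet? cycle (PySem.Int.mod i cl) with
  | some a, some b => a == b
  | _, _ => false

theorem vcLoop_eq_all (cs cycle : List Char) (cl : Int) (l : List Int) :
    vcLoop cs cycle cl l = l.all (vcCheck cs cycle cl) := by
  induction l with
  | nil => rfl
  | cons i rest ih =>
    simp only [vcLoop, List.all_cons, vcCheck]
    cases h1 : PySem.List.pyGet? cs i with
    | none => rfl
    | some a =>
      cases h2 : PySem.List.pyGet? cycle (PySem.Int.mod i cl) with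
      | none => rfl
      | some b =>
        by_cases hab : a = b
        · simp [hab, ih]
        · simp [hab]

-- periodicity with period c equals the self-shift identity drop c = take (n - c)
theorem periodic_iff_shift (cs : List Char) (c : Nat) (hc : 0 < c) :
    (∀ k, k < cs.length → cs[k]? = cs[k % c]?) ↔
      cs.drop c = cs.take (cs.length - c) := by
  constructor
  · intro hp
    apply List.ext_getElem?
    intro i
    rw [List.getElem?_drop, List.getElem?_take]
    by_cases hi : i < cs.length - c
    · simp only [hi, if_pos]
      have h1 : cs[c + i]? = cs[(c + i) % c]? := hp (c + i) (by omega)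
      have h2 : cs[i]? = cs[i % c]? := hp i (by omega)
      rw [h1, h2, Nat.add_mod_left]
    · simp only [hi, if_neg, not_false_eq_true]
      exact List.getElem?_eq_none (by omega)
  · intro hs
    have hshift : ∀ i, i < cs.length - c → cs[c + i]? = cs[i]? := by
      intro i hi
      have h := congrArg (fun l => l[i]?) hs
      simp only [List.getElem?_drop] at h
      rw [h, List.getElem?_take_of_lt hi]
    intro k
    induction k using Nat.strong_induction_on with
    | _ k ih =>
      intro hk
      by_cases hkc : k < c
      · rw [Nat.mod_eq_of_lt hkc]
      · have hk' : k - c < cs.length - c := by omega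
        have h1 : cs[c + (k - c)]? = cs[k - c]? := hshift (k - c) hk'
        have hck : c + (k - c) = k := by omega
        rw [hck] at h1
        have h2 : cs[k - c]? = cs[(k - c) % c]? := ih (k - c) (by omega) (by omega)
        have h3 : (k - c) % c = k % c := by
          conv_rhs => rw [show k = (k - c) + c by omega, Nat.add_mod_right]
        rw [h1, h2, h3]

-- vcCheck on an in-range natural index, cycle = take c cs, cl = c ≥ 1
theorem vcCheck_eq (cs : List Char) (c k : Nat) (hc : 0 < c) (hk : k < cs.length) :
    vcCheck cs (cs.take c) (c : Int) (k : Int) = (cs[k]? == cs[k % c]?) := by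
  have hmc : k % c < c := Nat.mod_lt k hc
  have hmk : k % c ≤ k := Nat.mod_le k c
  have hmod : k % c < (cs.take c).length := by
    simp only [List.length_take]
    omega
  have h1 := PySem.List.pyGet?_ofNat cs k hk
  have h2 : PySem.Int.mod (k : Int) (c : Int) = ((k % c : Nat) : Int) := PySem.Int.mod_natCast k c
  have h3 := PySem.List.pyGet?_ofNat (cs.take c) (k % c) hmod
  have h4 : (cs.take c)[k % c] = cs[k % c]'(by omega) := List.getElem_take
  have h5 : cs[k]? = some cs[k] := List.getElem?_eq_getElem hk
  have h6 : cs[k % c]? = some (cs[k % c]'(by omega)) := List.getElem?_eq_getElem (by omega)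
  simp only [vcCheck, h2, h1, h3, h4, h5, h6]
  by_cases hab : cs[k] = cs[k % c]'(by omega)
  · simp [hab]
  · simp [hab]

-- the whole loop, for cl = c ≥ 1, equals the self-shift comparison
theorem loop_eq_shift (cs : List Char) (c : Nat) (hc : 0 < c) :
    vcLoop cs (cs.take c) (c : Int) (PySem.List.pyRange 0 (cs.length : Int) 1)
      = (cs.drop c == cs.take (cs.length - c)) := by
  rw [vcLoop_eq_all, PySem.List.pyRange_one, Bool.eq_iff_iff, List.all_map, List.all_eq_true,
      beq_iff_eq, ← periodic_iff_shift cs c hc]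
  simp only [Int.sub_zero, Int.toNat_natCast, Function.comp_apply, List.mem_range, zero_add]
  constructor
  · intro h k hk
    have h' := h k hk
    rw [vcCheck_eq cs c k hc hk] at h'
    exact beq_iff_eq.mp h'
  · intro h k hk
    rw [vcCheck_eq cs c k hc hk]
    exact beq_iff_eq.mpr (h k hk)

-- ===== VERDICT (by name: the statement is the Claim_ definition above) =====
theorem verify_cycle_spec : Claim_equal_verify_cycle := by
  intro s cl _ hpre
  unfold Spec_verify_cycle verify_cycle verify_cycle_alt
  set cs := s.toList with hcs
  by_cases h0 : cl = 0
  · simp [h0]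
  · have hpos : 0 < cl := lt_of_le_of_ne hpre (Ne.symm h0)
    obtain ⟨c, rfl⟩ : ∃ c : Nat, cl = (c : Int) := ⟨cl.toNat, (Int.toNat_of_nonneg hpre).symm⟩
    have hc : 0 < c := by exact_mod_cast hpos
    simp only [h0, if_neg, not_false_eq_true]
    rw [PySem.List.slice_from_natCast, PySem.List.slice_to_neg_natCast cs c hc,
        PySem.List.slice_to_natCast]
    by_cases hn : (c : Int) = (cs.length : Int)
    · have hcn : c = cs.length := by exact_mod_cast hn
      simp [hcn]
    · simp only [hn, if_neg, not_false_eq_true]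
      exact loop_eq_shift cs c hc
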